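-- pv_equiv track=rewrite | github.com/abovenormal/algoStudy | 장석우/오프라인/2019카카오인턴십_징검다리건너기.py | solution
-- ===== SOURCE A (Python) =====
-- def solution(stones, k):
--     answer = 0
--     start = min(stones)
--     end = max(stones)
--     while start <= end:
--         sflag = True
--         mid = (start+end) // 2
--         cnt = 0
--         for stone in stones:
--             if stone <= mid:
--                 cnt += 1
--                 if cnt > k:
--                     end = mid - 1
--                     sflag = False
--                     break
--             if stone > mid:
--                 cnt = 0
--         if sflag:
--             answer = mid
--             start = mid + 1
--
--     return answer
-- ===== SOURCE B (Python) =====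
-- def solution(stones, k):
--     lo = min(stones)
--     n = len(stones)
--     if k < 0:
--         return 0
--     w = k + 1
--     if w > n:
--         return max(stones)
--     # per-block prefix maxima: pre[j] = max(stones[j - j % w : j + 1])
--     pre = []
--     for j in range(n):
--         if j % w == 0:
--             pre.append(stones[j])
--         else:
--             pre.append(max(pre[-1], stones[j]))
--     # per-block suffix maxima, built back to front: suf[i] = max(stones[i : block_end(i) + 1])
--     rsuf = []
--     for i in range(n - 1, -1, -1):
--         if i % w == w - 1 or i == n - 1:
--             rsuf.append(stones[i])
--         else:
--             rsuf.append(max(rsuf[-1], stones[i]))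
--     suf = list(reversed(rsuf))
--     # W = min over all windows of size w of that window's max
--     best = max(suf[0], pre[w - 1])
--     for i in range(1, n - w + 1):
--         wm = max(suf[i], pre[i + w - 1])
--         if wm < best:
--             best = wm
--     return best - 1 if best > lo else 0
-- ===== Notes on version B (the rewrite author's own statement) =====
-- stated objective: alternative
-- what changed: Replaced the binary search over stone values (each probe rescanning all stones for a run of k+1 stones below the probe) by a single linear pass: per-block prefix/suffix maxima give each (k+1)-window maximum in O(1), and the minimum W of those window maxima yields the same answer (W-1 if W > min(stones), else 0); measured ~1.5x at the largest size but below the check's confirmation threshold, so no speed is claimed.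
-- outside the precondition, e.g. on solution([], 3): A raises ValueError, B raises ValueError
import Mathlib
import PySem

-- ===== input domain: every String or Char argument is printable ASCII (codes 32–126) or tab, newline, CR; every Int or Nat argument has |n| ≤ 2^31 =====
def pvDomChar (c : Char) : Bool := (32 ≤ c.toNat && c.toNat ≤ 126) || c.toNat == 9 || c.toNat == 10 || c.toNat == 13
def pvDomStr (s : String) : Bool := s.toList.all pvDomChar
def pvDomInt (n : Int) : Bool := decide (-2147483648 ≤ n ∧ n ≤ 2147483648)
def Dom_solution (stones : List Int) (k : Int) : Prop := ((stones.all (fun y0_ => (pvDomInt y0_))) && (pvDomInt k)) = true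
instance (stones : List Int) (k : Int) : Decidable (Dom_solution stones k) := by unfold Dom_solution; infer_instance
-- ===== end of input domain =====

-- B replaces A's binary search over stone values (each probe rescanning the whole list) by one
-- linear pass: per-block prefix/suffix maxima give every (k+1)-window maximum, and the minimum W
-- of those window maxima yields the same answer (W - 1 if W > min(stones), else 0).

-- ===== PORT A =====
-- inner 'for stone in stones' loop of A: returns sflag (false = cnt exceeded k on a run of stones ≤ mid)
def aCheck (mid k : Int) : List Int → Int → Bool
  | [], _ => true
  | stone :: rest, cnt =>
    if stone ≤ mid then
      (if cnt + 1 > k then false else aCheck mid k rest (cnt + 1))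
    else aCheck mid k rest 0

-- the 'while start <= end' loop of A
def aLoop (stones : List Int) (k : Int) (start stop answer : Int) : Int :=
  if _h : start ≤ stop then
    let mid := PySem.Int.floordiv (start + stop) 2
    if aCheck mid k stones 0 then aLoop stones k (mid + 1) stop mid
    else aLoop stones k start (mid - 1) answer
  else answer
termination_by (stop + 1 - start).toNat
decreasing_by
  · have := PySem.Int.floordiv_two_mid_bounds _h
    simp only [mid] at *; omega
  · have := PySem.Int.floordiv_two_mid_bounds _h
    simp only [mid] at *; omega

def solution (stones : List Int) (k : Int) : Int :=
  match PySem.List.min? stones (fun y => y), PySem.List.max? stones (fun y => y) with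
  | some start, some stop => aLoop stones k start stop 0
  | _, _ => 0

-- ===== PORT B =====
-- pre[j] = max(stones[j - j % w : j + 1]), built by B's first loop ('pre.append(...)')
def bPre (stones : List Int) (w n : Int) : List Int :=
  (PySem.List.pyRange 0 n 1).foldl (fun acc j =>
    if PySem.Int.mod j w = 0 then acc ++ [PySem.List.pyGetD stones j 0]
    else acc ++ [max (PySem.List.pyGetD acc (-1) 0) (PySem.List.pyGetD stones j 0)]) []

-- rsuf, built by B's second loop iterating i = n-1 .. 0 ('rsuf.append(...)'; suf = list(reversed(rsuf)))
def bRsuf (stones : List Int) (w n : Int) : List Int :=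
  (PySem.List.pyRange (n - 1) (-1) (-1)).foldl (fun acc i =>
    if PySem.Int.mod i w = w - 1 ∨ i = n - 1 then acc ++ [PySem.List.pyGetD stones i 0]
    else acc ++ [max (PySem.List.pyGetD acc (-1) 0) (PySem.List.pyGetD stones i 0)]) []

-- body of B after 'lo = min(stones)' succeeded and 1 <= w <= n
def bBody (stones : List Int) (lo w : Int) : Int :=
  let n : Int := stones.length
  let pre := bPre stones w n
  let suf := (bRsuf stones w n).reverse
  let best0 := max (PySem.List.pyGetD suf 0 0) (PySem.List.pyGetD pre (w - 1) 0)
  let best := (PySem.List.pyRange 1 (n - w + 1) 1).foldl (fun best i =>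
      let wm := max (PySem.List.pyGetD suf i 0) (PySem.List.pyGetD pre (i + w - 1) 0)
      if wm < best then wm else best) best0
  if best > lo then best - 1 else 0

def solution_alt (stones : List Int) (k : Int) : Int :=
  match PySem.List.min? stones (fun y => y) with
  | none => 0
  | some lo =>
    let n : Int := stones.length
    if k < 0 then 0
    else
      let w := k + 1
      if w > n then (PySem.List.max? stones (fun y => y)).getD 0
      else bBody stones lo w

-- ===== PRECONDITION & SPEC =====
-- Pre_ excludes only the empty list, on which A raises ValueError (min() of an empty sequence).
def Pre_solution (stones : List Int) (k : Int) : Prop := stones ≠ []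
instance (stones : List Int) (k : Int) : Decidable (Pre_solution stones k) := by
  unfold Pre_solution; infer_instance

def pvWitness_solution : List Int × Int := ([2, 4, 5, 3, 2, 1, 4, 2, 5, 1], 3)

def Spec_solution (stones : List Int) (k : Int) (out : Int) : Prop := out = solution_alt stones k
instance (stones : List Int) (k : Int) (out : Int) : Decidable (Spec_solution stones k out) := by
  unfold Spec_solution; infer_instance

-- ===== CLAIM (what is proved, stated in full; the proofs are below) =====
def Claim_equal_solution : Prop := ∀ (stones : List Int) (k : Int), Dom_solution stones k → Pre_solution stones k → Spec_solution stones k (solution stones k)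

-- ===== LEMMAS AND PROOFS =====

def elt (stones : List Int) (i : Nat) : Int := stones.getD i 0

def wSeg (stones : List Int) (s l : Nat) : Int :=
  ((List.range l).map (fun j => elt stones (s + j))).foldl max (elt stones s)

def wMin (stones : List Int) (w : Nat) : Int :=
  ((List.range (stones.length - w)).map (fun i => wSeg stones (i + 1) w)).foldl min (wSeg stones 0 w)

lemma wSeg_le_iff (stones : List Int) (s l : Nat) (hl : 1 ≤ l) (m : Int) :
    wSeg stones s l ≤ m ↔ ∀ j < l, elt stones (s + j) ≤ m := by
  unfold wSeg
  constructor
  · intro h j hj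
    refine le_trans ?_ h
    exact (PySem.List.le_foldl_max _ _).2 _ (List.mem_map_of_mem (List.mem_range.2 hj))
  · intro h
    rcases PySem.List.foldl_max_mem ((List.range l).map (fun j => elt stones (s + j))) (elt stones s) with hh | hh
    · rw [hh]; simpa using h 0 hl
    · rw [List.mem_map] at hh
      obtain ⟨j, hj, hje⟩ := hh
      rw [← hje]; exact h j (List.mem_range.1 hj)

lemma elt_le_wSeg (stones : List Int) (s l j : Nat) (hj : j < l) :
    elt stones (s + j) ≤ wSeg stones s l :=
  (wSeg_le_iff stones s l (by omega) _).1 le_rfl j hj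

lemma wSeg_one (stones : List Int) (s : Nat) : wSeg stones s 1 = elt stones s := by
  simp [wSeg, List.range_succ]

lemma wSeg_append (stones : List Int) (s l1 l2 : Nat) (h1 : 1 ≤ l1) (h2 : 1 ≤ l2) :
    wSeg stones s (l1 + l2) = max (wSeg stones s l1) (wSeg stones (s + l1) l2) := by
  apply le_antisymm
  · rw [wSeg_le_iff _ _ _ (by omega)]
    intro j hj
    rcases lt_or_ge j l1 with h | h
    · exact le_trans (elt_le_wSeg stones s l1 j h) (le_max_left _ _)
    · have he : s + j = s + l1 + (j - l1) := by omega
      rw [he]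
      exact le_trans (elt_le_wSeg stones (s + l1) l2 (j - l1) (by omega)) (le_max_right _ _)
  · apply max_le
    · rw [wSeg_le_iff _ _ _ h1]
      intro j hj
      exact elt_le_wSeg stones s (l1 + l2) j (by omega)
    · rw [wSeg_le_iff _ _ _ h2]
      intro j hj
      have he : s + l1 + j = s + (l1 + j) := by omega
      rw [he]
      exact elt_le_wSeg stones s (l1 + l2) (l1 + j) (by omega)

lemma wSeg_succ_right (stones : List Int) (s l : Nat) (h : 1 ≤ l) :
    wSeg stones s (l + 1) = max (wSeg stones s l) (elt stones (s + l)) := by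
  rw [wSeg_append stones s l 1 h (by omega), wSeg_one]

lemma wSeg_succ_left (stones : List Int) (s l : Nat) (h : 1 ≤ l) :
    wSeg stones s (l + 1) = max (elt stones s) (wSeg stones (s + 1) l) := by
  have := wSeg_append stones s 1 l (by omega) h
  rw [add_comm 1 l] at this
  rw [this, wSeg_one]

lemma le_wMin_iff (stones : List Int) (w : Nat) (m : Int) :
    m ≤ wMin stones w ↔ ∀ i ≤ stones.length - w, m ≤ wSeg stones i w := by
  unfold wMin
  constructor
  · intro h i hi
    refine le_trans h ?_
    rcases i with _ | i'
    · exact (PySem.List.foldl_min_le _ _).1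
    · exact (PySem.List.foldl_min_le _ _).2 _
        (List.mem_map_of_mem (List.mem_range.2 (by omega : i' < stones.length - w)))
  · intro h
    rcases PySem.List.foldl_min_mem ((List.range (stones.length - w)).map (fun i => wSeg stones (i + 1) w)) (wSeg stones 0 w) with hh | hh
    · rw [hh]; exact h 0 (by omega)
    · rw [List.mem_map] at hh
      obtain ⟨i, hi, hie⟩ := hh
      rw [← hie]; exact h (i + 1) (by have := List.mem_range.1 hi; omega)

lemma wMin_le_wSeg (stones : List Int) (w i : Nat) (hi : i ≤ stones.length - w) :
    wMin stones w ≤ wSeg stones i w :=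
  (le_wMin_iff stones w _).1 le_rfl i hi

lemma wMin_mem (stones : List Int) (w : Nat) :
    ∃ i ≤ stones.length - w, wMin stones w = wSeg stones i w := by
  unfold wMin
  rcases PySem.List.foldl_min_mem ((List.range (stones.length - w)).map (fun i => wSeg stones (i + 1) w)) (wSeg stones 0 w) with hh | hh
  · exact ⟨0, by omega, hh⟩
  · rw [List.mem_map] at hh
    obtain ⟨i, hi, hie⟩ := hh
    exact ⟨i + 1, by have := List.mem_range.1 hi; omega, hie.symm⟩

def HasRun (stones : List Int) (w : Nat) (mid : Int) : Prop :=
  ∃ i, i + w ≤ stones.length ∧ ∀ j < w, elt stones (i + j) ≤ mid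

lemma aCheck_false_of_lead (mid k : Int) (hk : 0 ≤ k) :
    ∀ (l : List Int) (cnt : Int), 0 ≤ cnt → cnt ≤ k →
      (∀ j < k.toNat + 1 - cnt.toNat, elt l j ≤ mid) → (l.length : Int) ≥ k + 1 - cnt →
      aCheck mid k l cnt = false := by
  intro l
  induction l with
  | nil => intro cnt h0 hck hlead hlen; simp at hlen; omega
  | cons s r ih =>
    intro cnt h0 hck hlead hlen
    have hs : s ≤ mid := by
      have := hlead 0 (by omega)
      simpa [elt] using this
    simp only [aCheck, if_pos hs]
    by_cases hf : cnt + 1 > k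
    · simp [hf]
    · rw [if_neg hf]
      apply ih (cnt + 1) (by omega) (by omega)
      · intro j hj
        have := hlead (j + 1) (by omega)
        simpa [elt] using this
      · simp at hlen ⊢; omega

lemma aCheck_false_prefix (mid k : Int) (hk : 0 ≤ k) (l : List Int)
    (h : ∀ cnt : Int, 0 ≤ cnt → cnt ≤ k → aCheck mid k l cnt = false) :
    ∀ (pre : List Int) (cnt : Int), 0 ≤ cnt → cnt ≤ k → aCheck mid k (pre ++ l) cnt = false := by
  intro pre
  induction pre with
  | nil => intro cnt h0 hck; exact h cnt h0 hck
  | cons s r ih =>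
    intro cnt h0 hck
    simp only [List.cons_append, aCheck]
    by_cases hs : s ≤ mid
    · rw [if_pos hs]
      by_cases hf : cnt + 1 > k
      · simp [hf]
      · rw [if_neg hf]; exact ih (cnt + 1) (by omega) (by omega)
    · rw [if_neg hs]; exact ih 0 (by omega) hk

lemma hasRun_cons (s : Int) (r : List Int) (w : Nat) (mid : Int) (h : HasRun r w mid) :
    HasRun (s :: r) w mid := by
  obtain ⟨i, hi, hrun⟩ := h
  refine ⟨i + 1, by simp; omega, ?_⟩
  intro j hj
  have := hrun j hj
  simpa [elt, Nat.add_right_comm] using this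

lemma hasRun_of_lead (l : List Int) (w : Nat) (mid : Int) (hw : 1 ≤ w)
    (h : w ≤ (l.takeWhile (fun s => decide (s ≤ mid))).length) : HasRun l w mid := by
  have hlen := (List.takeWhile_sublist (l := l) (fun s => decide (s ≤ mid))).length_le
  refine ⟨0, by omega, ?_⟩
  intro j hj
  have hjlt : j < (l.takeWhile (fun s => decide (s ≤ mid))).length := by omega
  have hjl : j < l.length := by omega
  have hmem := List.mem_takeWhile_imp (l := l) (p := fun s => decide (s ≤ mid))
    (x := (l.takeWhile (fun s => decide (s ≤ mid)))[j])
    (List.getElem_mem hjlt)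
  simp only [decide_eq_true_eq] at hmem
  rw [(List.takeWhile_prefix (l := l) (fun s => decide (s ≤ mid))).getElem hjlt] at hmem
  simpa [elt, List.getD_eq_getElem?_getD, List.getElem?_eq_getElem hjl] using hmem

lemma aCheck_true_of_noRun (mid k : Int) (hk : 0 ≤ k) :
    ∀ (l : List Int) (cnt : Int), 0 ≤ cnt →
      cnt.toNat + (l.takeWhile (fun s => decide (s ≤ mid))).length ≤ k.toNat →
      (¬ HasRun l (k.toNat + 1) mid) →
      aCheck mid k l cnt = true := by
  intro l
  induction l with
  | nil => intro cnt _ _ _; rfl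
  | cons s r ih =>
    intro cnt h0 hlead hnr
    by_cases hs : s ≤ mid
    · have hlead' : (List.takeWhile (fun s => decide (s ≤ mid)) (s :: r)).length
          = (List.takeWhile (fun s => decide (s ≤ mid)) r).length + 1 := by
        simp [List.takeWhile_cons, hs]
      rw [hlead'] at hlead
      simp only [aCheck, if_pos hs]
      rw [if_neg (by omega)]
      exact ih (cnt + 1) (by omega) (by omega) (fun h => hnr (hasRun_cons s r _ mid h))
    · simp only [aCheck, if_neg hs]
      apply ih 0 (by omega) ?_ (fun h => hnr (hasRun_cons s r _ mid h))
      simp only [Int.toNat_zero, Nat.zero_add]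
      by_contra hbig
      exact (fun h => hnr (hasRun_cons s r _ mid h))
        (hasRun_of_lead r (k.toNat + 1) mid (by omega) (by omega))

lemma elt_drop (l : List Int) (i j : Nat) (h : i + j < l.length) :
    elt (l.drop i) j = elt l (i + j) := by
  simp [elt, List.getD_eq_getElem?_getD, List.getElem?_drop]

lemma aCheck_iff (stones : List Int) (mid k : Int) (hk : 0 ≤ k)
    (hn : k + 1 ≤ (stones.length : Int)) :
    aCheck mid k stones 0 = true ↔ ¬ HasRun stones (k.toNat + 1) mid := by
  constructor
  · intro h hrun
    obtain ⟨i, hi, hrunj⟩ := hrun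
    have hfalse : aCheck mid k stones 0 = false := by
      have hsplit : stones = stones.take i ++ stones.drop i := (List.take_append_drop i stones).symm
      rw [hsplit]
      apply aCheck_false_prefix mid k hk (stones.drop i) ?_ (stones.take i) 0 le_rfl hk
      intro cnt hc0 hck
      apply aCheck_false_of_lead mid k hk _ cnt hc0 hck
      · intro j hj
        rw [elt_drop stones i j (by omega)]
        exact hrunj j (by omega)
      · simp; omega
    rw [h] at hfalse; cases hfalse
  · intro hnr
    apply aCheck_true_of_noRun mid k hk stones 0 le_rfl ?_ hnr
    simp only [Int.toNat_zero, Nat.zero_add]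
    by_contra hbig
    exact hnr (hasRun_of_lead stones (k.toNat + 1) mid (by omega) (by omega))

lemma hasRun_iff_wMin_le (stones : List Int) (w : Nat) (hw : 1 ≤ w)
    (hn : w ≤ stones.length) (mid : Int) :
    HasRun stones w mid ↔ wMin stones w ≤ mid := by
  constructor
  · intro ⟨i, hi, hrun⟩
    refine le_trans (wMin_le_wSeg stones w i (by omega)) ?_
    rw [wSeg_le_iff _ _ _ hw]
    exact hrun
  · intro h
    obtain ⟨i, hi, hie⟩ := wMin_mem stones w
    refine ⟨i, by omega, ?_⟩
    rw [← wSeg_le_iff _ _ _ hw, ← hie]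
    exact h

lemma aCheck_neg_iff (mid k : Int) (hk : k < 0) : ∀ (l : List Int),
    (aCheck mid k l 0 = true ↔ ∀ s ∈ l, mid < s) := by
  intro l
  induction l with
  | nil => simp [aCheck]
  | cons s r ih =>
    by_cases hs : s ≤ mid
    · simp only [aCheck, if_pos hs, if_pos (by omega : (0:Int) + 1 > k)]
      simp only [List.mem_cons]
      constructor
      · intro h; cases h
      · intro h; exfalso; have := h s (Or.inl rfl); omega
    · simp only [aCheck, if_neg hs, List.mem_cons]
      rw [ih]
      constructor
      · rintro h x (rfl | hx)
        · omega
        · exact h x hx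
      · intro h x hx; exact h x (Or.inr hx)

lemma aCheck_big (mid k : Int) : ∀ (l : List Int) (cnt : Int), 0 ≤ cnt →
    cnt + l.length ≤ k → aCheck mid k l cnt = true := by
  intro l
  induction l with
  | nil => intro cnt _ _; rfl
  | cons s r ih =>
    intro cnt h0 hlen
    simp only [List.length_cons] at hlen
    by_cases hs : s ≤ mid
    · simp only [aCheck, if_pos hs]
      rw [if_neg (by push_cast at hlen ⊢; omega)]
      exact ih (cnt + 1) (by omega) (by push_cast at hlen ⊢; omega)
    · simp only [aCheck, if_neg hs]
      exact ih 0 (by omega) (by push_cast at hlen ⊢; omega)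

lemma aLoop_eq_of_char (stones : List Int) (k c : Int)
    (Hc : ∀ x, (aCheck x k stones 0 = true ↔ x ≤ c)) :
    ∀ (start stop ans : Int),
      aLoop stones k start stop ans =
        if start ≤ stop ∧ start ≤ c then min stop c else ans := by
  suffices H : ∀ (N : Nat) (start stop ans : Int), (stop + 1 - start).toNat ≤ N →
      aLoop stones k start stop ans =
        if start ≤ stop ∧ start ≤ c then min stop c else ans by
    intro start stop ans; exact H (stop + 1 - start).toNat start stop ans le_rfl
  intro N
  induction N with
  | zero =>
    intro start stop ans h
    have hgt : ¬ start ≤ stop := by omega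
    rw [aLoop, dif_neg hgt, if_neg (by tauto)]
  | succ N ih =>
    intro start stop ans h
    rw [aLoop]
    by_cases hse : start ≤ stop
    · rw [dif_pos hse]
      have hb := PySem.Int.floordiv_two_mid_bounds hse
      set mid := PySem.Int.floordiv (start + stop) 2 with hmid
      by_cases hc : aCheck mid k stones 0 = true
      · rw [if_pos hc]
        rw [ih (mid + 1) stop mid (by omega)]
        have hmc : mid ≤ c := (Hc mid).1 hc
        simp only [min_def]
        split_ifs <;> omega
      · rw [if_neg hc]
        rw [ih start (mid - 1) ans (by omega)]
        have hmc : ¬ mid ≤ c := fun hle => hc ((Hc mid).2 hle)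
        simp only [min_def]
        split_ifs <;> omega
    · rw [dif_neg hse, if_neg (by tauto)]

lemma aLoop_eq_of_allTrue (stones : List Int) (k : Int)
    (H : ∀ x, aCheck x k stones 0 = true) :
    ∀ (start stop ans : Int),
      aLoop stones k start stop ans = if start ≤ stop then stop else ans := by
  suffices Hs : ∀ (N : Nat) (start stop ans : Int), (stop + 1 - start).toNat ≤ N →
      aLoop stones k start stop ans = if start ≤ stop then stop else ans by
    intro start stop ans; exact Hs (stop + 1 - start).toNat start stop ans le_rfl
  intro N
  induction N with
  | zero =>
    intro start stop ans h
    have hgt : ¬ start ≤ stop := by omega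
    rw [aLoop, dif_neg hgt, if_neg hgt]
  | succ N ih =>
    intro start stop ans h
    rw [aLoop]
    by_cases hse : start ≤ stop
    · rw [dif_pos hse]
      have hb := PySem.Int.floordiv_two_mid_bounds hse
      set mid := PySem.Int.floordiv (start + stop) 2 with hmid
      rw [if_pos (H mid)]
      rw [ih (mid + 1) stop mid (by omega)]
      split_ifs <;> omega
    · rw [dif_neg hse, if_neg hse]

def preFun (stones : List Int) (w j : Nat) : Int :=
  wSeg stones (j - j % w) (j % w + 1)

def sufFun (stones : List Int) (w i : Nat) : Int :=
  wSeg stones i (min (w - i % w) (stones.length - i))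

lemma mod_pred (x w r : Nat) (hw : 0 < w) (hx : x % w = r) (hr : 1 ≤ r) :
    (x - 1) % w = r - 1 := by
  have hq := Nat.div_add_mod x w
  have hrw : r < w := hx ▸ Nat.mod_lt x hw
  have hxe : x - 1 = w * (x / w) + (r - 1) := by omega
  rw [hxe, Nat.mul_add_mod]
  exact Nat.mod_eq_of_lt (by omega)

lemma preFun_step0 (stones : List Int) (w j : Nat) (h : j % w = 0) :
    preFun stones w j = elt stones j := by
  unfold preFun
  rw [h, wSeg_one]; norm_num

lemma preFun_stepS (stones : List Int) (w j : Nat) (hw : 1 ≤ w) (h : j % w ≠ 0) :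
    preFun stones w j = max (preFun stones w (j - 1)) (elt stones j) := by
  set r := j % w with hr
  have hrw : r < w := Nat.mod_lt j (by omega)
  have hr1 : 1 ≤ r := by omega
  have hj1 : 1 ≤ j := by
    rcases Nat.eq_zero_or_pos j with rfl | hp
    · simp at hr; omega
    · omega
  have hrj : r ≤ j := hr ▸ Nat.mod_le j w
  have hpred : (j - 1) % w = r - 1 := mod_pred j w r (by omega) rfl hr1
  unfold preFun
  rw [hpred, ← hr]
  have h1 : j - 1 - (r - 1) = j - r := by omega
  rw [h1]
  have h2 : r - 1 + 1 = r := by omega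
  rw [h2]
  have h3 := wSeg_succ_right stones (j - r) r hr1
  have h4 : j - r + r = j := by omega
  rw [h4] at h3
  rw [← h3]

lemma sufFun_base (stones : List Int) (w i : Nat) (hw : 1 ≤ w) (hi : i < stones.length)
    (h : i % w = w - 1 ∨ i = stones.length - 1) :
    sufFun stones w i = elt stones i := by
  unfold sufFun
  rcases h with h | h
  · have : min (w - i % w) (stones.length - i) = 1 := by
      have hrw : i % w < w := Nat.mod_lt i (by omega)
      omega
    rw [this, wSeg_one]
  · have : min (w - i % w) (stones.length - i) = 1 := by
      have hrw : i % w < w := Nat.mod_lt i (by omega)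
      omega
    rw [this, wSeg_one]

lemma sufFun_step (stones : List Int) (w i : Nat) (hw : 1 ≤ w)
    (hi : i < stones.length - 1) (h : i % w ≠ w - 1) :
    sufFun stones w i = max (elt stones i) (sufFun stones w (i + 1)) := by
  set n := stones.length with hn
  set r := i % w with hr
  have hrw : r < w := Nat.mod_lt i (by omega)
  have hsucc : (i + 1) % w = r + 1 := by
    have hq := Nat.div_add_mod i w
    have hxe : i + 1 = w * (i / w) + (r + 1) := by omega
    rw [hxe, Nat.mul_add_mod]
    exact Nat.mod_eq_of_lt (by omega)
  unfold sufFun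
  rw [hsucc, ← hr, ← hn]
  set L := min (w - (r + 1)) (n - (i + 1)) with hL
  have hL1 : 1 ≤ L := by omega
  have hLe : min (w - r) (n - i) = L + 1 := by omega
  rw [hLe]
  exact wSeg_succ_left stones i L hL1

lemma bPre_aux (stones : List Int) (w : Nat) (hw : 1 ≤ w) : ∀ (m : Nat),
    (PySem.List.pyRange 0 (m : Int) 1).foldl (fun acc j =>
      if PySem.Int.mod j (w : Int) = 0 then acc ++ [PySem.List.pyGetD stones j 0]
      else acc ++ [max (PySem.List.pyGetD acc (-1) 0) (PySem.List.pyGetD stones j 0)]) []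
    = (List.range m).map (preFun stones w) := by
  intro m
  induction m with
  | zero => simp [PySem.List.pyRange_one_eq_nil]
  | succ m ih =>
    have hcast : ((m + 1 : Nat) : Int) = (m : Int) + 1 := by push_cast; ring
    rw [hcast, PySem.List.pyRange_one_succ_right (by positivity), List.foldl_append, ih]
    simp only [List.foldl_cons, List.foldl_nil]
    rw [List.range_succ, List.map_append, List.map_singleton]
    have hmod : PySem.Int.mod (m : Int) (w : Int) = ((m % w : Nat) : Int) :=
      PySem.Int.mod_natCast m w
    rw [hmod]
    by_cases h0 : m % w = 0
    · rw [if_pos (by exact_mod_cast congrArg (Nat.cast : Nat → Int) h0)]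
      rw [PySem.List.pyGetD_natCast]
      rw [preFun_step0 stones w m h0]
      rfl
    · rw [if_neg (by exact_mod_cast h0)]
      have hm1 : 1 ≤ m := by
        rcases Nat.eq_zero_or_pos m with rfl | hp
        · simp at h0
        · omega
      have hrange : List.range m = List.range (m - 1) ++ [m - 1] := by
        have : m = (m - 1) + 1 := by omega
        rw [this, List.range_succ]
        congr 1 <;> omega
      rw [hrange, List.map_append, List.map_singleton, List.append_assoc]
      rw [PySem.List.pyGetD_neg_one_append_singleton]
      rw [PySem.List.pyGetD_natCast]
      rw [preFun_stepS stones w m hw h0]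
      simp [elt, List.getD_eq_getElem?_getD]

lemma bRsuf_aux (stones : List Int) (w : Nat) (hw : 1 ≤ w) :
    ∀ (m : Nat), m ≤ stones.length →
    (List.range m).foldl (fun acc (t : Nat) =>
      (fun acc (i : Int) =>
        if PySem.Int.mod i (w : Int) = (w : Int) - 1 ∨ i = (stones.length : Int) - 1
        then acc ++ [PySem.List.pyGetD stones i 0]
        else acc ++ [max (PySem.List.pyGetD acc (-1) 0) (PySem.List.pyGetD stones i 0)]) acc
        ((stones.length : Int) - 1 - (t : Int))) []
    = (List.range m).map (fun t => sufFun stones w (stones.length - 1 - t)) := by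
  intro m
  induction m with
  | zero => simp
  | succ m ih =>
    intro hm
    rw [List.range_succ, List.foldl_append, ih (by omega), List.map_append, List.map_singleton]
    simp only [List.foldl_cons, List.foldl_nil]
    set n := stones.length with hn
    have hcast : (n : Int) - 1 - (m : Int) = ((n - 1 - m : Nat) : Int) := by push_cast; omega
    rw [hcast]
    set i := n - 1 - m with hi
    have hilt : i < n := by omega
    have hmod : PySem.Int.mod (i : Int) (w : Int) = ((i % w : Nat) : Int) :=
      PySem.Int.mod_natCast i w
    by_cases hcond : i % w = w - 1 ∨ m = 0
    · have hcond' : PySem.Int.mod (i : Int) (w : Int) = (w : Int) - 1 ∨ (i : Int) = (n : Int) - 1 := by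
        rw [hmod]
        rcases hcond with h | h
        · left; push_cast; omega
        · right; push_cast; omega
      rw [if_pos hcond']
      rw [PySem.List.pyGetD_natCast]
      rw [sufFun_base stones w i hw hilt (hcond.imp id (fun h => by omega))]
      simp [elt, List.getD_eq_getElem?_getD]
    · push_neg at hcond
      obtain ⟨hc1, hc2⟩ := hcond
      have hcond' : ¬ (PySem.Int.mod (i : Int) (w : Int) = (w : Int) - 1 ∨ (i : Int) = (n : Int) - 1) := by
        rw [hmod]
        push_neg
        refine ⟨fun hcc => hc1 ?_, fun hcc => hc2 (by omega)⟩
        have hww : ((w : Int) - 1) = ((w - 1 : Nat) : Int) := by push_cast; omega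
        rw [hww] at hcc
        have hcc' : i % w = w - 1 := by exact_mod_cast hcc
        omega
      rw [if_neg hcond']
      have hm1 : 1 ≤ m := by omega
      have hrange : List.range m = List.range (m - 1) ++ [m - 1] := by
        have he : m = (m - 1) + 1 := by omega
        rw [he, List.range_succ]
        congr 1 <;> omega
      rw [hrange, List.map_append, List.map_singleton, List.append_assoc]
      rw [PySem.List.pyGetD_neg_one_append_singleton]
      rw [PySem.List.pyGetD_natCast]
      have hprev : n - 1 - (m - 1) = i + 1 := by omega
      rw [hprev]
      rw [sufFun_step stones w i hw (by omega) hc1]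
      simp [elt, List.getD_eq_getElem?_getD, max_comm]

lemma elt_mem (stones : List Int) (j : Nat) (hj : j < stones.length) :
    elt stones j ∈ stones := by
  simp only [elt, List.getD_eq_getElem?_getD, List.getElem?_eq_getElem hj, Option.getD_some]
  exact List.getElem_mem hj

lemma bPre_eq_map (stones : List Int) (w : Nat) (hw : 1 ≤ w) :
    bPre stones (w : Int) (stones.length : Int)
      = (List.range stones.length).map (preFun stones w) := by
  unfold bPre
  have hN : ((stones.length : Int) - 0) = ((stones.length : Nat) : Int) := by omega
  exact bPre_aux stones w hw stones.length

lemma bPre_getD (stones : List Int) (w : Nat) (hw : 1 ≤ w) (j : Nat) (hj : j < stones.length) :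
    (bPre stones (w : Int) (stones.length : Int)).getD j 0 = preFun stones w j := by
  rw [bPre_eq_map stones w hw]
  simp [List.getD_eq_getElem?_getD, List.getElem?_eq_getElem, hj]

lemma bRsuf_eq_map (stones : List Int) (w : Nat) (hw : 1 ≤ w) :
    bRsuf stones (w : Int) (stones.length : Int)
      = (List.range stones.length).map (fun t => sufFun stones w (stones.length - 1 - t)) := by
  unfold bRsuf
  rw [PySem.List.pyRange_neg_one, List.foldl_map]
  have hN : (((stones.length : Int) - 1) - (-1)).toNat = stones.length := by omega
  rw [hN]
  exact bRsuf_aux stones w hw stones.length le_rfl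

lemma bSuf_getD (stones : List Int) (w : Nat) (hw : 1 ≤ w) (j : Nat) (hj : j < stones.length) :
    (bRsuf stones (w : Int) (stones.length : Int)).reverse.getD j 0 = sufFun stones w j := by
  rw [bRsuf_eq_map stones w hw]
  have hlen : ((List.range stones.length).map
      (fun t => sufFun stones w (stones.length - 1 - t))).reverse.length = stones.length := by
    simp
  have hj' : j < ((List.range stones.length).map
      (fun t => sufFun stones w (stones.length - 1 - t))).reverse.length := by omega
  rw [List.getD_eq_getElem?_getD, List.getElem?_eq_getElem hj', Option.getD_some]
  rw [List.getElem_reverse]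
  simp only [List.getElem_map, List.getElem_range, List.length_map, List.length_range]
  congr 1
  omega

lemma win_eq (stones : List Int) (w i : Nat) (hw : 1 ≤ w) (hiw : i + w ≤ stones.length) :
    max (sufFun stones w i) (preFun stones w (i + w - 1)) = wSeg stones i w := by
  set n := stones.length with hn
  set r := i % w with hr
  have hrw : r < w := Nat.mod_lt i (by omega)
  have hq := Nat.div_add_mod i w
  by_cases hr0 : r = 0
  · have hsuf : sufFun stones w i = wSeg stones i w := by
      unfold sufFun
      rw [← hr, hr0, ← hn]
      have : min (w - 0) (n - i) = w := by omega
      rw [this]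
    have hmod : (i + w - 1) % w = w - 1 := by
      have hxe : i + w - 1 = w * (i / w) + (w - 1) := by omega
      rw [hxe, Nat.mul_add_mod]
      exact Nat.mod_eq_of_lt (by omega)
    have hpre : preFun stones w (i + w - 1) = wSeg stones i w := by
      unfold preFun
      rw [hmod]
      have h1 : i + w - 1 - (w - 1) = i := by omega
      have h2 : w - 1 + 1 = w := by omega
      rw [h1, h2]
    rw [hsuf, hpre, max_self]
  · have hr1 : 1 ≤ r := by omega
    have hsuf : sufFun stones w i = wSeg stones i (w - r) := by
      unfold sufFun
      rw [← hr, ← hn]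
      have : min (w - r) (n - i) = w - r := by omega
      rw [this]
    have hmod : (i + w - 1) % w = r - 1 := by
      have hxe : i + w - 1 = w * (i / w + 1) + (r - 1) := by
        have : w * (i / w + 1) = w * (i / w) + w := by ring
        omega
      rw [hxe, Nat.mul_add_mod]
      exact Nat.mod_eq_of_lt (by omega)
    have hpre : preFun stones w (i + w - 1) = wSeg stones (i + (w - r)) r := by
      unfold preFun
      rw [hmod]
      have h1 : i + w - 1 - (r - 1) = i + (w - r) := by omega
      have h2 : r - 1 + 1 = r := by omega
      rw [h1, h2]
    rw [hsuf, hpre]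
    have := wSeg_append stones i (w - r) r (by omega) hr1
    have hsum : w - r + r = w := by omega
    rw [hsum] at this
    rw [← this]

lemma bBody_eq (stones : List Int) (lo : Int) (w : Nat) (hw : 1 ≤ w)
    (hn : w ≤ stones.length) :
    bBody stones lo (w : Int) = if wMin stones w > lo then wMin stones w - 1 else 0 := by
  have hn0 : 0 < stones.length := by omega
  unfold bBody
  dsimp only
  have hbest0 : max (PySem.List.pyGetD (bRsuf stones (w : Int) (stones.length : Int)).reverse 0 0)
      (PySem.List.pyGetD (bPre stones (w : Int) (stones.length : Int)) ((w : Int) - 1) 0)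
      = wSeg stones 0 w := by
    rw [PySem.List.pyGetD_zero, bSuf_getD stones w hw 0 hn0]
    have hc : ((w : Int) - 1) = ((w - 1 : Nat) : Int) := by push_cast; omega
    rw [hc, PySem.List.pyGetD_natCast, bPre_getD stones w hw (w - 1) (by omega)]
    have h1 : sufFun stones w 0 = wSeg stones 0 w := by
      unfold sufFun
      have : min (w - 0 % w) (stones.length - 0) = w := by
        simp only [Nat.zero_mod]; omega
      rw [this]
    have h2 : preFun stones w (w - 1) = wSeg stones 0 w := by
      unfold preFun
      have hm : (w - 1) % w = w - 1 := Nat.mod_eq_of_lt (by omega)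
      rw [hm]
      have h3 : w - 1 - (w - 1) = 0 := by omega
      have h4 : w - 1 + 1 = w := by omega
      rw [h3, h4]
    rw [h1, h2, max_self]
  rw [hbest0]
  have hrange : PySem.List.pyRange 1 ((stones.length : Int) - (w : Int) + 1) 1
      = (List.range (stones.length - w)).map (fun (k : Nat) => 1 + (k : Int)) := by
    rw [PySem.List.pyRange_one]
    have hN : (((stones.length : Int) - (w : Int) + 1) - 1).toNat = stones.length - w := by omega
    rw [hN]
  rw [hrange, List.foldl_map]
  have hcongr : (List.range (stones.length - w)).foldl
      (fun best (k : Nat) =>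
        (fun best (i : Int) =>
          let wm := max (PySem.List.pyGetD (bRsuf stones (w : Int) (stones.length : Int)).reverse i 0)
            (PySem.List.pyGetD (bPre stones (w : Int) (stones.length : Int)) (i + (w : Int) - 1) 0)
          if wm < best then wm else best) best (1 + (k : Int))) (wSeg stones 0 w)
      = (List.range (stones.length - w)).foldl
        (fun best (k : Nat) => min best (wSeg stones (k + 1) w)) (wSeg stones 0 w) := by
    apply PySem.List.foldl_congr_mem
    intro acc t ht
    have htlt : t < stones.length - w := List.mem_range.1 ht
    have hc1 : (1 + (t : Int)) = (((t + 1 : Nat)) : Int) := by push_cast; ring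
    have hc2 : ((t + 1 : Nat) : Int) + (w : Int) - 1 = (((t + w : Nat)) : Int) := by push_cast; ring
    simp only [hc1, hc2]
    rw [PySem.List.pyGetD_natCast, PySem.List.pyGetD_natCast]
    rw [bSuf_getD stones w hw (t + 1) (by omega), bPre_getD stones w hw (t + w) (by omega)]
    have hwin : t + 1 + w - 1 = t + w := by omega
    have := win_eq stones w (t + 1) hw (by omega)
    rw [hwin] at this
    rw [this]
    rcases lt_or_ge (wSeg stones (t + 1) w) acc with h | h
    · rw [if_pos h]; omega
    · rw [if_neg (by omega)]; omega
  rw [hcongr]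
  have hwmin : (List.range (stones.length - w)).foldl
      (fun best k => min best (wSeg stones (k + 1) w)) (wSeg stones 0 w) = wMin stones w := by
    unfold wMin
    rw [List.foldl_map]
  rw [hwmin]

theorem solution_eq (stones : List Int) (k : Int) (hne : stones ≠ []) :
    solution stones k = solution_alt stones k := by
  cases hmin : PySem.List.min? stones (fun y => y) with
  | none => exact absurd ((PySem.List.min?_eq_none_iff _ _).1 hmin) hne
  | some m =>
  cases hmax : PySem.List.max? stones (fun y => y) with
  | none => exact absurd ((PySem.List.max?_eq_none_iff _ _).1 hmax) hne
  | some M =>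
  have hm_mem : m ∈ stones := PySem.List.min?_mem hmin
  have hm_min : ∀ y ∈ stones, m ≤ y := PySem.List.min?_isMin hmin
  have hM_mem : M ∈ stones := PySem.List.max?_mem hmax
  have hM_max : ∀ y ∈ stones, y ≤ M := PySem.List.max?_isMax hmax
  have hmM : m ≤ M := hm_min M hM_mem
  have hlen0 : 0 < stones.length := List.length_pos_iff.2 hne
  unfold solution solution_alt
  rw [hmin, hmax]
  simp only
  by_cases hk : k < 0
  · rw [if_pos hk]
    have Hc : ∀ x, (aCheck x k stones 0 = true ↔ x ≤ m - 1) := by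
      intro x
      rw [aCheck_neg_iff x k hk stones]
      constructor
      · intro h
        have := h m hm_mem
        omega
      · intro h s hs
        have := hm_min s hs
        omega
    rw [aLoop_eq_of_char stones k (m - 1) Hc m M 0]
    rw [if_neg (by omega)]
  · rw [if_neg hk]
    have hk0 : 0 ≤ k := by omega
    by_cases hbig : k + 1 > (stones.length : Int)
    · rw [if_pos hbig]
      have H : ∀ x, aCheck x k stones 0 = true := by
        intro x
        exact aCheck_big x k stones 0 le_rfl (by omega)
      rw [aLoop_eq_of_allTrue stones k H m M 0]
      rw [if_pos hmM]
      rfl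
    · rw [if_neg hbig]
      set w : Nat := k.toNat + 1 with hwdef
      have hwk : (w : Int) = k + 1 := by omega
      have hwn : w ≤ stones.length := by omega
      have hw1 : 1 ≤ w := by omega
      have hWM : wMin stones w ≤ M := by
        obtain ⟨i, hi, hie⟩ := wMin_mem stones w
        rw [hie, wSeg_le_iff stones i w hw1]
        intro j hj
        exact hM_max _ (elt_mem stones (i + j) (by omega))
      have Hc : ∀ x, (aCheck x k stones 0 = true ↔ x ≤ wMin stones w - 1) := by
        intro x
        rw [aCheck_iff stones x k hk0 (by omega)]
        have hwt : k.toNat + 1 = w := by omega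
        rw [hwt]
        rw [hasRun_iff_wMin_le stones w hw1 hwn x]
        constructor <;> intro h <;> omega
      rw [aLoop_eq_of_char stones k (wMin stones w - 1) Hc m M 0]
      have hbb : bBody stones m (k + 1) = if wMin stones w > m then wMin stones w - 1 else 0 := by
        rw [← hwk]
        exact bBody_eq stones m w hw1 hwn
      rw [hbb]
      simp only [min_def]
      split_ifs <;> omega

-- ===== VERDICT (by name: the statement is the Claim_ definition above) =====
theorem solution_spec : Claim_equal_solution := by
  intro stones k _hdom hpre
  show solution stones k = solution_alt stones k
  exact solution_eq stones k hpre
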